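-- pv_equiv track=rewrite | github.com/arnavgupta9000/Leetcode | daily/before march 2025/problem2657.py | solve
-- ===== SOURCE A (Python) =====
-- def solve(a, b):
--     n = len(a)
--     res = []
--
--     hash = {}
--     cost = 0
--
--     for i in range(n):
--         if a[i] in hash:
--             cost +=1
--         else:
--             hash[a[i]] = 1
--         if b[i] in hash:
--             cost +=1
--         else:
--             hash[b[i]] = 1
--
--         res.append(cost)
--     return res
-- ===== SOURCE B (Python) =====
-- def solve(a, b):
--     n = len(a)
--     stream = []
--     for i in range(n):
--         stream.append(a[i])
--         stream.append(b[i])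
--     order = sorted(range(2 * n), key=lambda j: stream[j])
--     dup = [0] * (2 * n)
--     for t in range(1, 2 * n):
--         if stream[order[t]] == stream[order[t - 1]]:
--             dup[order[t]] = 1
--     res = []
--     total = 0
--     for i in range(n):
--         total += dup[2 * i] + dup[2 * i + 1]
--         res.append(total)
--     return res
-- ===== Notes on version B (the rewrite author's own statement) =====
-- stated objective: alternative
-- what changed: Replaces A's single-pass dict-membership counting by a sort-based algorithm: interleave the two arrays into one stream, stably sort the stream positions by value, mark every position whose sorted predecessor holds the same value as a repeat, then emit prefix sums of the repeat flags; no hash/seen structure is maintained.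
import Mathlib
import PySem

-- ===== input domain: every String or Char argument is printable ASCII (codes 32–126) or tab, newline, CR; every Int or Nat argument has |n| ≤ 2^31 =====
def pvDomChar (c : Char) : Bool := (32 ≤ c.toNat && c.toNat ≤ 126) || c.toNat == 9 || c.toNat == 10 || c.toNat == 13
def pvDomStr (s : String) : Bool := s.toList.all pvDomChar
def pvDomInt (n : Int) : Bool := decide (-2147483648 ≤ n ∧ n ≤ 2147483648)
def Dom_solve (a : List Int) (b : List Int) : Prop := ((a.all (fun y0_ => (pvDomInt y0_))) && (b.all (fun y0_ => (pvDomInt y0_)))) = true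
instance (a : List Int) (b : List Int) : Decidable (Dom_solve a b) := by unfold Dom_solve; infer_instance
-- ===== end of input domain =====

-- B replaces A's one-pass dict-membership counting by a sort-based staged algorithm (stable-sort the interleaved stream's
-- positions by value, mark positions whose sorted predecessor holds the same value, prefix-sum the marks); objective: alternative.


-- ===== PORT A =====
-- One iteration of A's loop body: check a[i] then b[i] against the dict, bump cost or insert, append cost.
def solveStepA (a : List Int) (b : List Int)
    (st : PySem.Dict Int Int × Int × List Int) (i : Nat) :
    PySem.Dict Int Int × Int × List Int :=
  let x := a.getD i 0
  let h1 := if st.1.contains x then st.1 else st.1.insert x 1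
  let c1 := if st.1.contains x then st.2.1 + 1 else st.2.1
  let y := b.getD i 0
  let h2 := if h1.contains y then h1 else h1.insert y 1
  let c2 := if h1.contains y then c1 + 1 else c1
  (h2, c2, st.2.2 ++ [c2])

def solve (a : List Int) (b : List Int) : List Int :=
  ((List.range a.length).foldl (solveStepA a b) (PySem.Dict.empty, 0, [])).2.2

-- ===== PORT B =====
-- Source B stage 1: the interleaved stream a[0], b[0], a[1], b[1], …
def solveStream (a : List Int) (b : List Int) : List Int :=
  (List.range a.length).foldl (fun s i => s ++ [a.getD i 0, b.getD i 0]) []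

-- Source B stage 2: order = sorted(range(2*n), key=lambda j: stream[j])  (PySem.List.sorted is Python's stable sort)
def solveOrder (a : List Int) (b : List Int) : List Nat :=
  PySem.List.sorted (List.range (2 * a.length)) (fun j => (solveStream a b).getD j 0) false

-- Source B stage 3: dup[order[t]] = 1 whenever stream[order[t]] == stream[order[t-1]]
-- (Python's range(1, 2*n) is ported as List.range' 1 (2*n - 1): the same list of indices.)
def solveDup (a : List Int) (b : List Int) : List Int :=
  (List.range' 1 (2 * a.length - 1)).foldl
    (fun d t =>
      if (solveStream a b).getD ((solveOrder a b).getD t 0) 0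
          == (solveStream a b).getD ((solveOrder a b).getD (t - 1) 0) 0 then
        d.set ((solveOrder a b).getD t 0) (1 : Int)
      else d)
    (List.replicate (2 * a.length) (0 : Int))

-- Source B stage 4 loop body: total += dup[2*i] + dup[2*i+1]; res.append(total)
def solveStepB (dup : List Int) (st : Int × List Int) (i : Nat) : Int × List Int :=
  let t := st.1 + dup.getD (2 * i) 0 + dup.getD (2 * i + 1) 0
  (t, st.2 ++ [t])

def solve_alt (a : List Int) (b : List Int) : List Int :=
  ((List.range a.length).foldl (solveStepB (solveDup a b)) ((0 : Int), ([] : List Int))).2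

-- ===== PRECONDITION & SPEC =====
-- Both programs index b[i] for every i < len(a); Pre_ excludes exactly the IndexError case len(b) < len(a).
def Pre_solve (a : List Int) (b : List Int) : Prop := a.length ≤ b.length
instance (a : List Int) (b : List Int) : Decidable (Pre_solve a b) := by unfold Pre_solve; infer_instance
def pvWitness_solve : List Int × List Int := ([1, 2, 1], [2, 3, 3])

def Spec_solve (a : List Int) (b : List Int) (out : List Int) : Prop := out = solve_alt a b
instance (a : List Int) (b : List Int) (out : List Int) : Decidable (Spec_solve a b out) := by unfold Spec_solve; infer_instance

-- ===== CLAIM (what is proved, stated in full; the proofs are below) =====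
def Claim_equal_solve : Prop := ∀ (a : List Int) (b : List Int), Dom_solve a b → Pre_solve a b → Spec_solve a b (solve a b)

-- ===== LEMMAS AND PROOFS =====

-- The key of stream position j, and the lexicographic (value, position) order that the stable sort realises.
def pvKey (s : List Int) (j : Nat) : Int := s.getD j 0
def pvLex (s : List Int) (p q : Nat) : Prop :=
  pvKey s p < pvKey s q ∨ (pvKey s p = pvKey s q ∧ p < q)

-- "position p is a repeat": some earlier stream position holds the same value.
def pvGt (s : List Int) (p : Nat) : Prop := ∃ q, q < p ∧ pvKey s q = pvKey s p

lemma pvLex_key_le {s : List Int} {p q : Nat} (h : pvLex s p q) : pvKey s p ≤ pvKey s q := by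
  rcases h with h | ⟨h, _⟩ <;> omega

-- Inserting x after all currently-smaller-or-equal keys keeps the list pvLex-sorted,
-- provided every element already present has a smaller original position than x.
lemma insertBy_pairwise_lex (s : List Int) (x : Nat) :
    ∀ acc : List Nat, acc.Pairwise (pvLex s) → (∀ p ∈ acc, p < x) →
      (PySem.List.insertBy (fun u v => decide (pvKey s u < pvKey s v)) x acc).Pairwise (pvLex s) := by
  intro acc
  induction acc with
  | nil => intro _ _; simp [PySem.List.insertBy]
  | cons y ys ih =>
    intro hpw hlt
    rw [List.pairwise_cons] at hpw
    simp only [PySem.List.insertBy]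
    split_ifs with hxy
    · have hxy' : pvKey s x < pvKey s y := by simpa using hxy
      rw [List.pairwise_cons]
      refine ⟨?_, List.pairwise_cons.mpr hpw⟩
      intro z hz
      rcases List.mem_cons.mp hz with rfl | hz
      · exact Or.inl hxy'
      · exact Or.inl (lt_of_lt_of_le hxy' (pvLex_key_le (hpw.1 z hz)))
    · have hyx : pvKey s y ≤ pvKey s x := by simpa [not_lt] using hxy
      rw [List.pairwise_cons]
      constructor
      · intro z hz
        rcases (PySem.List.mem_insertBy _ _ _ _).mp hz with rfl | hz
        · rcases lt_or_eq_of_le hyx with h | h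
          · exact Or.inl h
          · exact Or.inr ⟨h, hlt y (by simp)⟩
        · exact hpw.1 z hz
      · exact ih hpw.2 (fun p hp => hlt p (by simp [hp]))

-- Folding Python's insertion sort over positions in increasing order yields a pvLex-sorted list.
lemma foldl_insertBy_pairwise_lex (s : List Int) :
    ∀ (l acc : List Nat), acc.Pairwise (pvLex s) → (∀ p ∈ acc, ∀ q ∈ l, p < q) →
      l.Pairwise (· < ·) →
      (l.foldl (fun acc x => PySem.List.insertBy (fun u v => decide (pvKey s u < pvKey s v)) x acc) acc).Pairwise (pvLex s) := by
  intro l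
  induction l with
  | nil => intro acc hpw _ _; simpa using hpw
  | cons x l ih =>
    intro acc hpw hord hpl
    rw [List.pairwise_cons] at hpl
    rw [List.foldl_cons]
    refine ih _ (insertBy_pairwise_lex s x acc hpw (fun p hp => hord p hp x (by simp))) ?_ hpl.2
    intro p hp q hq
    rcases (PySem.List.mem_insertBy _ _ _ _).mp hp with rfl | hp
    · exact hpl.1 q hq
    · exact hord p hp q (by simp [hq])

lemma order_pairwise (a b : List Int) :
    (solveOrder a b).Pairwise (pvLex (solveStream a b)) := by
  unfold solveOrder
  rw [PySem.List.sorted_eq_foldl_insertBy]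
  exact foldl_insertBy_pairwise_lex (solveStream a b) (List.range (2 * a.length)) []
    (by simp) (by simp) List.pairwise_lt_range

lemma order_perm (a b : List Int) : (solveOrder a b).Perm (List.range (2 * a.length)) := by
  exact PySem.List.sorted_perm _ _ _

-- Soundness of the neighbour test: equal key with the sorted predecessor means an earlier equal position exists.
lemma cond_sound {s : List Int} {ord : List Nat} {m : Nat}
    (hperm : ord.Perm (List.range m)) (hpw : ord.Pairwise (pvLex s))
    {t : Nat} (h1 : 1 ≤ t) (ht : t < m)
    (hc : pvKey s (ord.getD t 0) = pvKey s (ord.getD (t - 1) 0)) :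
    pvGt s (ord.getD t 0) := by
  have hlen : ord.length = m := by
    have := hperm.length_eq; simpa using this
  rw [List.getD_eq_getElem ord 0 (by omega)] at hc ⊢
  rw [List.getD_eq_getElem ord 0 (by omega : t - 1 < ord.length)] at hc
  have hlex : pvLex s (ord[t - 1]'(by omega)) (ord[t]'(by omega)) :=
    List.pairwise_iff_getElem.mp hpw (t - 1) t (by omega) (by omega) (by omega)
  rcases hlex with h | ⟨h, hlt⟩
  · omega
  · exact ⟨ord[t - 1]'(by omega), hlt, h⟩

-- Completeness: if position p = ord[t] has an earlier equal position, the sorted predecessor has the same key.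
lemma cond_complete {s : List Int} {ord : List Nat} {m : Nat}
    (hperm : ord.Perm (List.range m)) (hpw : ord.Pairwise (pvLex s))
    {t : Nat} (ht : t < m) (hgt : pvGt s (ord.getD t 0)) :
    1 ≤ t ∧ pvKey s (ord.getD t 0) = pvKey s (ord.getD (t - 1) 0) := by
  have hlen : ord.length = m := by
    have := hperm.length_eq; simpa using this
  rw [List.getD_eq_getElem ord 0 (by omega)] at hgt ⊢
  obtain ⟨q, hqlt, hqk⟩ := hgt
  -- q occurs in ord at some position u
  have hpmem : (ord[t]'(by omega)) ∈ List.range m := hperm.mem_iff.mp (List.getElem_mem _)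
  have hpm : (ord[t]'(by omega)) < m := List.mem_range.mp hpmem
  have hqmem : q ∈ ord := hperm.mem_iff.mpr (List.mem_range.mpr (by omega))
  obtain ⟨u, hu, hueq⟩ := List.mem_iff_getElem.mp hqmem
  -- u must precede t
  have hut : u < t := by
    by_contra hge
    rcases Nat.lt_or_ge t u with hlt | hle
    · have hlex : pvLex s (ord[t]'(by omega)) (ord[u]'hu) :=
        List.pairwise_iff_getElem.mp hpw t u (by omega) hu hlt
      rw [hueq] at hlex
      rcases hlex with h | ⟨h, hlt'⟩ <;> omega
    · have : u = t := by omega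
      subst this
      rw [hueq] at hqlt
      omega
  have h1 : 1 ≤ t := by omega
  refine ⟨h1, ?_⟩
  rw [List.getD_eq_getElem ord 0 (by omega : t - 1 < ord.length)]
  -- key q ≤ key ord[t-1] ≤ key ord[t] = key q
  have hle1 : pvKey s q ≤ pvKey s (ord[t - 1]'(by omega)) := by
    rcases Nat.lt_or_ge u (t - 1) with hlt | hge
    · have hlex : pvLex s (ord[u]'hu) (ord[t - 1]'(by omega)) :=
        List.pairwise_iff_getElem.mp hpw u (t - 1) hu (by omega) hlt
      rw [hueq] at hlex
      exact pvLex_key_le hlex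
    · have : u = t - 1 := by omega
      subst this
      rw [hueq]
  have hle2 : pvKey s (ord[t - 1]'(by omega)) ≤ pvKey s (ord[t]'(by omega)) :=
    pvLex_key_le (List.pairwise_iff_getElem.mp hpw (t - 1) t (by omega) (by omega) (by omega))
  omega

-- One write of the mark loop, pointwise.
lemma getD_set_int (d : List Int) (i : Nat) (v : Int) (p : Nat) :
    (d.set i v).getD p 0 = if p = i ∧ i < d.length then v else d.getD p 0 := by
  unfold List.getD
  rw [List.getElem?_set]
  by_cases h1 : i = p
  · subst h1
    by_cases h2 : i < d.length <;> simp [h2]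
  · rw [if_neg h1, if_neg (fun h => h1 h.1.symm)]

-- Marked(j) p: some already-processed step wrote a 1 at p.
def pvMarked (s : List Int) (ord : List Nat) (j p : Nat) : Prop :=
  ∃ t, 1 ≤ t ∧ t < j ∧ ord.getD t 0 = p ∧
    pvKey s (ord.getD t 0) = pvKey s (ord.getD (t - 1) 0)

-- The mark-writing fold, characterised pointwise by pvMarked.
lemma dup_fold_inv (s : List Int) (ord : List Nat) (m : Nat) :
    ∀ (k j : Nat) (d : List Int), 1 ≤ j → j + k = m → d.length = m →
      (∀ p, p < m → ((pvMarked s ord j p → d.getD p 0 = 1) ∧ (¬ pvMarked s ord j p → d.getD p 0 = 0))) →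
      ∀ p, p < m →
        ((pvMarked s ord m p →
          ((List.range' j k).foldl
            (fun d t => if s.getD (ord.getD t 0) 0 == s.getD (ord.getD (t - 1) 0) 0 then
                d.set (ord.getD t 0) (1 : Int) else d) d).getD p 0 = 1) ∧
         (¬ pvMarked s ord m p →
          ((List.range' j k).foldl
            (fun d t => if s.getD (ord.getD t 0) 0 == s.getD (ord.getD (t - 1) 0) 0 then
                d.set (ord.getD t 0) (1 : Int) else d) d).getD p 0 = 0)) := by
  intro k
  induction k with
  | zero =>
    intro j d h1 hjk hdl hinv p hp
    have : j = m := by omega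
    subst this
    simpa using hinv p hp
  | succ k ih =>
    intro j d h1 hjk hdl hinv p hp
    rw [List.range'_succ, List.foldl_cons]
    by_cases hc : pvKey s (ord.getD j 0) = pvKey s (ord.getD (j - 1) 0)
    · have hbeq : (s.getD (ord.getD j 0) 0 == s.getD (ord.getD (j - 1) 0) 0) = true := by
        unfold pvKey at hc; exact beq_iff_eq.mpr hc
      rw [if_pos hbeq]
      refine ih (j + 1) _ (by omega) (by omega) (by rw [List.length_set]; exact hdl) ?_ p hp
      intro p' hp'
      rw [getD_set_int]
      constructor
      · intro hmk
        obtain ⟨t, ht1, htj, hteq, htk⟩ := hmk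
        by_cases hte : t = j
        · subst hte
          rw [if_pos ⟨hteq.symm, by omega⟩]
        · have hmk' : pvMarked s ord j p' := ⟨t, ht1, by omega, hteq, htk⟩
          split_ifs with hcond
          · rfl
          · exact (hinv p' hp').1 hmk'
      · intro hmk
        have hne : p' ≠ ord.getD j 0 := fun he =>
          hmk ⟨j, h1, by omega, he.symm, hc⟩
        rw [if_neg (fun hh => hne hh.1)]
        exact (hinv p' hp').2 (fun ⟨t, ht1, htj, hteq, htk⟩ =>
          hmk ⟨t, ht1, by omega, hteq, htk⟩)
    · have hbeq : (s.getD (ord.getD j 0) 0 == s.getD (ord.getD (j - 1) 0) 0) = false := by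
        unfold pvKey at hc; rw [beq_eq_false_iff_ne]; exact hc
      rw [hbeq, if_neg (by simp)]
      refine ih (j + 1) d (by omega) (by omega) hdl ?_ p hp
      intro p' hp'
      constructor
      · intro hmk
        obtain ⟨t, ht1, htj, hteq, htk⟩ := hmk
        have hte : t ≠ j := fun he => hc (he ▸ htk)
        exact (hinv p' hp').1 ⟨t, ht1, by omega, hteq, htk⟩
      · intro hmk
        exact (hinv p' hp').2 (fun ⟨t, ht1, htj, hteq, htk⟩ =>
          hmk ⟨t, ht1, by omega, hteq, htk⟩)

-- Final characterisation of solveDup.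
lemma solveDup_spec (a b : List Int) :
    ∀ p, p < 2 * a.length →
      ((pvGt (solveStream a b) p → (solveDup a b).getD p 0 = 1) ∧
       (¬ pvGt (solveStream a b) p → (solveDup a b).getD p 0 = 0)) := by
  intro p hp
  have hm : 1 ≤ 2 * a.length := by omega
  have hperm := order_perm a b
  have hpw := order_pairwise a b
  have hfold := dup_fold_inv (solveStream a b) (solveOrder a b) (2 * a.length)
    (2 * a.length - 1) 1 (List.replicate (2 * a.length) (0 : Int)) (by omega) (by omega)
    (by simp)
    (by
      intro p' hp'
      constructor
      · rintro ⟨t, ht1, htj, -, -⟩; omega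
      · intro _; exact List.getD_replicate 0 hp')
    p hp
  have hiff : pvMarked (solveStream a b) (solveOrder a b) (2 * a.length) p ↔
      pvGt (solveStream a b) p := by
    constructor
    · rintro ⟨t, ht1, htm, hteq, htk⟩
      have := cond_sound hperm hpw ht1 htm htk
      rwa [hteq] at this
    · intro hgt
      -- p occurs in solveOrder at some position t
      have hpmem : p ∈ solveOrder a b := hperm.mem_iff.mpr (List.mem_range.mpr hp)
      obtain ⟨u, hu, hueq⟩ := List.mem_iff_getElem.mp hpmem
      have hlen : (solveOrder a b).length = 2 * a.length := by
        have := hperm.length_eq; simpa using this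
      have hgd : (solveOrder a b).getD u 0 = p := by
        rw [List.getD_eq_getElem _ 0 hu, hueq]
      have hgt' : pvGt (solveStream a b) ((solveOrder a b).getD u 0) := by rwa [hgd]
      obtain ⟨h1, hk⟩ := cond_complete hperm hpw (by omega : u < 2 * a.length) hgt'
      exact ⟨u, h1, by omega, hgd, hk⟩
  unfold solveDup
  constructor
  · intro hgt
    exact hfold.1 (hiff.mpr hgt)
  · intro hgt
    exact hfold.2 (fun hmk => hgt (hiff.mp hmk))

-- Stream lemmas: solveStream's fold in closed form, its length, prefixes and entries.
def pvS (a b : List Int) (n : Nat) : List Int :=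
  (List.range n).flatMap (fun i => [a.getD i 0, b.getD i 0])

lemma pvS_succ (a b : List Int) (n : Nat) :
    pvS a b (n + 1) = pvS a b n ++ [a.getD n 0, b.getD n 0] := by
  simp [pvS, List.range_succ]

lemma solveStream_eq (a b : List Int) : solveStream a b = pvS a b a.length := by
  unfold solveStream
  generalize a.length = n
  induction n with
  | zero => simp [pvS]
  | succ n ih => rw [List.range_succ, List.foldl_append, ih, pvS_succ]; simp

lemma length_pvS (a b : List Int) (n : Nat) : (pvS a b n).length = 2 * n := by
  induction n with
  | zero => simp [pvS]
  | succ n ih => rw [pvS_succ]; simp [ih]; omega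

lemma length_solveStream (a b : List Int) : (solveStream a b).length = 2 * a.length := by
  rw [solveStream_eq]; exact length_pvS a b a.length

lemma getD_pvS_even (a b : List Int) {i n : Nat} (h : i < n) :
    (pvS a b n).getD (2 * i) 0 = a.getD i 0 := by
  induction n with
  | zero => omega
  | succ n ih =>
    rcases Nat.lt_or_ge i n with hlt | hge
    · rw [pvS_succ, List.getD_append _ _ _ _ (by rw [length_pvS]; omega)]
      exact ih hlt
    · have : i = n := by omega
      subst this
      rw [pvS_succ, List.getD_append_right _ _ _ _ (by rw [length_pvS])]
      simp [length_pvS]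

lemma getD_pvS_odd (a b : List Int) {i n : Nat} (h : i < n) :
    (pvS a b n).getD (2 * i + 1) 0 = b.getD i 0 := by
  induction n with
  | zero => omega
  | succ n ih =>
    rcases Nat.lt_or_ge i n with hlt | hge
    · rw [pvS_succ, List.getD_append _ _ _ _ (by rw [length_pvS]; omega)]
      exact ih hlt
    · have : i = n := by omega
      subst this
      rw [pvS_succ, List.getD_append_right _ _ _ _ (by rw [length_pvS]; omega)]
      have h2 : 2 * i + 1 - (pvS a b i).length = 1 := by rw [length_pvS]; omega
      rw [h2]; rfl

lemma getD_solveStream_even (a b : List Int) {i : Nat} (h : i < a.length) :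
    (solveStream a b).getD (2 * i) 0 = a.getD i 0 := by
  rw [solveStream_eq]; exact getD_pvS_even a b h

lemma getD_solveStream_odd (a b : List Int) {i : Nat} (h : i < a.length) :
    (solveStream a b).getD (2 * i + 1) 0 = b.getD i 0 := by
  rw [solveStream_eq]; exact getD_pvS_odd a b h

lemma mem_take_iff (s : List Int) {p : Nat} (h : p ≤ s.length) (z : Int) :
    z ∈ s.take p ↔ ∃ q, q < p ∧ s.getD q 0 = z := by
  rw [List.mem_iff_getElem]
  constructor
  · rintro ⟨j, hj, hz⟩
    have hjl : j < p := by
      have := (by simpa [List.length_take] using hj : j < p ∧ j < s.length)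
      exact this.1
    refine ⟨j, hjl, ?_⟩
    rw [List.getD_eq_getElem s 0 (by omega)]
    rw [← hz, List.getElem_take]
  · rintro ⟨q, hq, hz⟩
    refine ⟨q, by simp [List.length_take]; omega, ?_⟩
    rw [List.getElem_take, ← List.getD_eq_getElem s 0 (by omega)]
    exact hz

lemma pvGt_iff_mem_take {s : List Int} {p : Nat} (h : p < s.length) :
    pvGt s p ↔ s.getD p 0 ∈ s.take p := by
  rw [mem_take_iff s (by omega)]
  unfold pvGt pvKey
  tauto

-- Coupled loop: A's dict/cost fold and B's prefix-sum fold produce the same appended lists.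
lemma couple (a b : List Int) (dup : List Int)
    (hd : ∀ p, p < 2 * a.length →
      ((pvGt (solveStream a b) p → dup.getD p 0 = 1) ∧
       (¬ pvGt (solveStream a b) p → dup.getD p 0 = 0))) :
    ∀ (k i : Nat) (h : PySem.Dict Int Int) (cost : Int) (res : List Int),
      i + k ≤ a.length →
      (∀ z, h.contains z = true ↔ z ∈ (solveStream a b).take (2 * i)) →
      ((List.range' i k).foldl (solveStepA a b) (h, cost, res)).2.2 =
      ((List.range' i k).foldl (solveStepB dup) (cost, res)).2 := by
  intro k
  induction k with
  | zero => intro i h cost res _ _; simp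
  | succ k ih =>
    intro i h cost res hik hmem
    have hi : i < a.length := by omega
    have hslen : (solveStream a b).length = 2 * a.length := length_solveStream a b
    have hsx : (solveStream a b).getD (2 * i) 0 = a.getD i 0 := getD_solveStream_even a b hi
    have hsy : (solveStream a b).getD (2 * i + 1) 0 = b.getD i 0 := getD_solveStream_odd a b hi
    have hgetx : (solveStream a b)[2 * i]? = some (a.getD i 0) := by
      rw [List.getElem?_eq_getElem (by omega)]
      rw [← List.getD_eq_getElem (solveStream a b) 0 (by omega), hsx]
    have hgety : (solveStream a b)[2 * i + 1]? = some (b.getD i 0) := by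
      rw [List.getElem?_eq_getElem (by omega)]
      rw [← List.getD_eq_getElem (solveStream a b) 0 (by omega), hsy]
    have htake1 : (solveStream a b).take (2 * i + 1)
        = (solveStream a b).take (2 * i) ++ [a.getD i 0] := by
      rw [List.take_add_one, hgetx]; rfl
    have htake2 : (solveStream a b).take (2 * i + 2)
        = (solveStream a b).take (2 * i + 1) ++ [b.getD i 0] := by
      rw [show 2 * i + 2 = (2 * i + 1) + 1 by omega, List.take_add_one, hgety]; rfl
    have hgt1 : pvGt (solveStream a b) (2 * i) ↔ a.getD i 0 ∈ (solveStream a b).take (2 * i) := by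
      rw [pvGt_iff_mem_take (by omega), hsx]
    have hgt2 : pvGt (solveStream a b) (2 * i + 1)
        ↔ b.getD i 0 ∈ (solveStream a b).take (2 * i + 1) := by
      rw [pvGt_iff_mem_take (by omega), hsy]
    obtain ⟨hd1a, hd1b⟩ := hd (2 * i) (by omega)
    obtain ⟨hd2a, hd2b⟩ := hd (2 * i + 1) (by omega)
    have h22 : 2 * (i + 1) = 2 * i + 2 := by ring
    rw [List.range'_succ, List.foldl_cons, List.foldl_cons]
    by_cases hx : a.getD i 0 ∈ (solveStream a b).take (2 * i)
    · -- a[i] already seen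
      have hcx : h.contains (a.getD i 0) = true := (hmem _).mpr hx
      have hdg1 : dup.getD (2 * i) 0 = 1 := hd1a (hgt1.mpr hx)
      have hm1 : ∀ z, h.contains z = true ↔ z ∈ (solveStream a b).take (2 * i + 1) := by
        intro z
        rw [hmem z, htake1, List.mem_append, List.mem_singleton]
        constructor
        · exact Or.inl
        · rintro (hz | rfl)
          · exact hz
          · exact hx
      by_cases hy : b.getD i 0 ∈ (solveStream a b).take (2 * i + 1)
      · have hcy : h.contains (b.getD i 0) = true := (hm1 _).mpr hy
        have hdg2 : dup.getD (2 * i + 1) 0 = 1 := hd2a (hgt2.mpr hy)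
        have hm2 : ∀ z, h.contains z = true ↔ z ∈ (solveStream a b).take (2 * (i + 1)) := by
          intro z
          rw [h22, hm1 z, htake2, List.mem_append, List.mem_singleton]
          constructor
          · exact Or.inl
          · rintro (hz | rfl)
            · exact hz
            · exact hy
        simp only [solveStepA, solveStepB, hcx, hcy, hdg1, hdg2, if_true]
        exact ih (i + 1) h (cost + 1 + 1) (res ++ [cost + 1 + 1]) (by omega) hm2
      · have hcy : h.contains (b.getD i 0) = false := by
          rw [← Bool.not_eq_true, hm1]; exact hy
        have hdg2 : dup.getD (2 * i + 1) 0 = 0 := hd2b (fun hg => hy (hgt2.mp hg))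
        have hm2 : ∀ z, (h.insert (b.getD i 0) (1 : Int)).contains z = true
            ↔ z ∈ (solveStream a b).take (2 * (i + 1)) := by
          intro z
          rw [h22, PySem.Dict.contains_insert, htake2, List.mem_append, List.mem_singleton,
            Bool.or_eq_true, beq_iff_eq, hm1 z]
          tauto
        simp only [solveStepA, solveStepB, hcx, hcy, hdg1, hdg2, if_true, Bool.false_eq_true,
          if_false, add_zero]
        exact ih (i + 1) _ (cost + 1) (res ++ [cost + 1]) (by omega) hm2
    · -- a[i] not yet seen
      have hcx : h.contains (a.getD i 0) = false := by
        rw [← Bool.not_eq_true, hmem]; exact hx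
      have hdg1 : dup.getD (2 * i) 0 = 0 := hd1b (fun hg => hx (hgt1.mp hg))
      have hm1 : ∀ z, (h.insert (a.getD i 0) (1 : Int)).contains z = true
          ↔ z ∈ (solveStream a b).take (2 * i + 1) := by
        intro z
        rw [PySem.Dict.contains_insert, htake1, List.mem_append, List.mem_singleton,
          Bool.or_eq_true, beq_iff_eq, hmem z]
        tauto
      by_cases hy : b.getD i 0 ∈ (solveStream a b).take (2 * i + 1)
      · have hcy : (h.insert (a.getD i 0) (1 : Int)).contains (b.getD i 0) = true := (hm1 _).mpr hy
        have hdg2 : dup.getD (2 * i + 1) 0 = 1 := hd2a (hgt2.mpr hy)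
        have hm2 : ∀ z, (h.insert (a.getD i 0) (1 : Int)).contains z = true
            ↔ z ∈ (solveStream a b).take (2 * (i + 1)) := by
          intro z
          rw [h22, hm1 z, htake2, List.mem_append, List.mem_singleton]
          constructor
          · exact Or.inl
          · rintro (hz | rfl)
            · exact hz
            · exact hy
        simp only [solveStepA, solveStepB, hcx, hcy, hdg1, hdg2, if_true, Bool.false_eq_true,
          if_false, add_zero]
        exact ih (i + 1) _ (cost + 1) (res ++ [cost + 1]) (by omega) hm2
      · have hcy : (h.insert (a.getD i 0) (1 : Int)).contains (b.getD i 0) = false := by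
          rw [← Bool.not_eq_true, hm1]; exact hy
        have hdg2 : dup.getD (2 * i + 1) 0 = 0 := hd2b (fun hg => hy (hgt2.mp hg))
        have hm2 : ∀ z, ((h.insert (a.getD i 0) (1 : Int)).insert (b.getD i 0) (1 : Int)).contains z = true
            ↔ z ∈ (solveStream a b).take (2 * (i + 1)) := by
          intro z
          rw [h22, PySem.Dict.contains_insert, htake2, List.mem_append, List.mem_singleton,
            Bool.or_eq_true, beq_iff_eq, hm1 z]
          tauto
        simp only [solveStepA, solveStepB, hcx, hcy, hdg1, hdg2, Bool.false_eq_true,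
          if_false, add_zero]
        exact ih (i + 1) _ cost (res ++ [cost]) (by omega) hm2

-- ===== VERDICT (by name: the statement is the Claim_ definition above) =====
theorem solve_spec : Claim_equal_solve := by
  intro a b _ _
  unfold Spec_solve solve solve_alt
  rw [List.range_eq_range']
  exact couple a b (solveDup a b) (solveDup_spec a b) a.length 0 PySem.Dict.empty 0 []
    (by omega) (by intro z; simp [PySem.Dict.contains_empty])
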